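-- pv_equiv track=rewrite | github.com/jaeml06/Codeing-Test | 프로그래머스/1/42862. 체육복/체육복.py | solution
-- ===== SOURCE A (Python) =====
-- def solution(n, lost, reserve):
--     lost = set(lost)
--     reserve = set(reserve)
--     common = lost & reserve
--
--     lost -= common
--     reserve -= common
--
--     for s in sorted(lost):
--         if s - 1 in reserve:
--             reserve.remove(s - 1)
--             lost.remove(s)
--         elif s + 1 in reserve:
--             reserve.remove(s + 1)
--             lost.remove(s)
--     return n - len(lost)
-- ===== SOURCE B (Python) =====
-- def solution(n, lost, reserve):
--     # Two-pointer merge over the two sorted, deduped, disjoint lists.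
--     L = sorted(set(lost) - set(reserve))
--     R = sorted(set(reserve) - set(lost))
--     j = 0
--     unmatched = 0
--     for s in L:
--         while j < len(R) and R[j] < s - 1:
--             j += 1
--         if j < len(R) and R[j] <= s + 1:
--             j += 1
--         else:
--             unmatched += 1
--     return n - unmatched
-- ===== Notes on version B (the rewrite author's own statement) =====
-- stated objective: alternative
-- what changed: Replaces A's loop of per-student set membership tests and removals on a mutating reserve set by a single two-pointer merge over the two sorted, deduped, disjoint lists, consuming each reserve element at most once.
import Mathlib
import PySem

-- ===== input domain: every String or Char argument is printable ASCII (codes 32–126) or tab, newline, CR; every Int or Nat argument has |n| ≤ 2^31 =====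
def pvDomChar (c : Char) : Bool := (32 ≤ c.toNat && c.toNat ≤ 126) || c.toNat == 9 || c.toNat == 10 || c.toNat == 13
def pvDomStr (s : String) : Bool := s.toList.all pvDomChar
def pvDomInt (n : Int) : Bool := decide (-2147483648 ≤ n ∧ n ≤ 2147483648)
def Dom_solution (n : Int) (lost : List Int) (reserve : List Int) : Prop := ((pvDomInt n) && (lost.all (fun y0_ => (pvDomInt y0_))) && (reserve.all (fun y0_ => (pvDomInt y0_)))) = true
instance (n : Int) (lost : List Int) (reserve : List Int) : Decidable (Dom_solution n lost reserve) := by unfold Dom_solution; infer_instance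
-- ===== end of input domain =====

-- B replaces A's per-student set lookups/removals by a single two-pointer merge of the two
-- sorted, deduped, disjoint lists (alternative decomposition; same asymptotic cost).

-- ===== PORT A =====
-- 'reserve.remove(x)' is ported as Set.discard: it is guarded by the membership test, so it
-- never raises and equals discard there (PySem.Set.remove?_of_mem); likewise lost.remove(s).
def solution (n : Int) (lost : List Int) (reserve : List Int) : Int :=
  let lostS0 : PySem.Set Int := PySem.Set.ofList lost
  let reserveS0 : PySem.Set Int := PySem.Set.ofList reserve
  let common := PySem.Set.inter lostS0 reserveS0
  let lostS1 := PySem.Set.diff lostS0 common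
  let reserveS1 := PySem.Set.diff reserveS0 common
  let p := (PySem.List.sorted lostS1 (fun x => x) false).foldl
      (fun (st : PySem.Set Int × PySem.Set Int) s =>
        if PySem.Set.contains st.2 (s - 1) then
          (PySem.Set.discard st.1 s, PySem.Set.discard st.2 (s - 1))
        else if PySem.Set.contains st.2 (s + 1) then
          (PySem.Set.discard st.1 s, PySem.Set.discard st.2 (s + 1))
        else st)
      (lostS1, reserveS1)
  n - PySem.Set.len p.1

-- ===== PORT B =====
-- the for-loop of Source B over L, carrying the unconsumed suffix of R (the pointer j) and
-- counting the unmatched students; the while-loop is the dropWhile.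
def twoPointer : List Int → List Int → Int
  | [], _ => 0
  | s :: L, R =>
    match R.dropWhile (fun r => decide (r < s - 1)) with
    | [] => twoPointer L [] + 1
    | r :: rs => if r ≤ s + 1 then twoPointer L rs else twoPointer L (r :: rs) + 1

def solution_alt (n : Int) (lost : List Int) (reserve : List Int) : Int :=
  let L := PySem.List.sorted (PySem.Set.diff (PySem.Set.ofList lost) (PySem.Set.ofList reserve)) (fun x => x) false
  let R := PySem.List.sorted (PySem.Set.diff (PySem.Set.ofList reserve) (PySem.Set.ofList lost)) (fun x => x) false
  n - twoPointer L R

-- ===== PRECONDITION & SPEC =====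
def Spec_solution (n : Int) (lost : List Int) (reserve : List Int) (out : Int) : Prop := out = solution_alt n lost reserve
instance (n : Int) (lost : List Int) (reserve : List Int) (out : Int) : Decidable (Spec_solution n lost reserve out) := by unfold Spec_solution; infer_instance

-- ===== CLAIM (what is proved, stated in full; the proofs are below) =====
def Claim_equal_solution : Prop := ∀ (n : Int) (lost : List Int) (reserve : List Int), Dom_solution n lost reserve → Spec_solution n lost reserve (solution n lost reserve)

-- ===== LEMMAS AND PROOFS =====

-- number of matched students in A's loop (its effect on the reserve set, abstracted)
def mA : List Int → PySem.Set Int → Nat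
  | [], _ => 0
  | s :: L, R =>
    if PySem.Set.contains R (s - 1) then mA L (PySem.Set.discard R (s - 1)) + 1
    else if PySem.Set.contains R (s + 1) then mA L (PySem.Set.discard R (s + 1)) + 1
    else mA L R

theorem discard_length (s : Int) (ls : List Int) (hnd : ls.Nodup) (hs : s ∈ ls) :
    (PySem.Set.discard ls s).length + 1 = ls.length := by
  induction ls with
  | nil => cases hs
  | cons a t ih =>
    rw [List.nodup_cons] at hnd
    obtain ⟨hna, hndt⟩ := hnd
    simp only [PySem.Set.discard, List.filter_cons]
    by_cases ha : a = s
    · subst ha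
      rw [if_neg (by simp)]
      have hft : List.filter (fun y => !y == a) t = t :=
        List.filter_eq_self.mpr (fun y hy => by simp; intro h; subst h; exact hna hy)
      rw [hft]
      simp
    · rw [if_pos (by simp [ha])]
      have hs' : s ∈ t := by
        rcases List.mem_cons.mp hs with h|h
        · exact absurd h.symm ha
        · exact h
      have := ih hndt hs'
      simp only [PySem.Set.discard] at this
      simp only [List.length_cons]
      omega

theorem mA_perm (L : List Int) : ∀ {R R' : List Int}, R.Perm R' → mA L R = mA L R' := by
  induction L with
  | nil => intro R R' _; rfl
  | cons s L ih =>
    intro R R' h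
    have hc1 : PySem.Set.contains R (s - 1) = PySem.Set.contains R' (s - 1) := by
      rw [← Bool.coe_iff_coe, PySem.Set.contains_iff, PySem.Set.contains_iff]
      exact h.mem_iff
    have hc2 : PySem.Set.contains R (s + 1) = PySem.Set.contains R' (s + 1) := by
      rw [← Bool.coe_iff_coe, PySem.Set.contains_iff, PySem.Set.contains_iff]
      exact h.mem_iff
    simp only [mA, hc1, hc2]
    by_cases h1 : PySem.Set.contains R' (s - 1) = true
    · rw [if_pos h1, if_pos h1]
      exact congrArg (· + 1) (ih (List.Perm.filter _ h))
    · rw [if_neg h1, if_neg h1]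
      by_cases h2 : PySem.Set.contains R' (s + 1) = true
      · rw [if_pos h2, if_pos h2]
        exact congrArg (· + 1) (ih (List.Perm.filter _ h))
      · rw [if_neg h2, if_neg h2]; exact ih h

theorem fold_len (L : List Int) : ∀ (ls R : List Int), L.Nodup → ls.Nodup → (∀ s ∈ L, s ∈ ls) →
    ((L.foldl
      (fun (st : PySem.Set Int × PySem.Set Int) s =>
        if PySem.Set.contains st.2 (s - 1) then
          (PySem.Set.discard st.1 s, PySem.Set.discard st.2 (s - 1))
        else if PySem.Set.contains st.2 (s + 1) then
          (PySem.Set.discard st.1 s, PySem.Set.discard st.2 (s + 1))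
        else st)
      (ls, R)).1).length + mA L R = ls.length := by
  induction L with
  | nil => intro ls R _ _ _; simp [mA]
  | cons s L ih =>
    intro ls R hnd hlsnd hmem
    rw [List.nodup_cons] at hnd
    obtain ⟨hsL, hndL⟩ := hnd
    have hsls : s ∈ ls := hmem s (by simp)
    have hsub : ∀ x ∈ L, x ∈ PySem.Set.discard ls s := by
      intro x hx
      exact (PySem.Set.mem_discard ls s x).mpr ⟨hmem x (by simp [hx]), fun he => hsL (he ▸ hx)⟩
    have hnd' : (PySem.Set.discard ls s).Nodup := PySem.Set.nodup_discard ls s hlsnd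
    simp only [List.foldl_cons, mA]
    by_cases h1 : PySem.Set.contains R (s - 1) = true
    · rw [if_pos h1, if_pos h1]
      have := ih (PySem.Set.discard ls s) (PySem.Set.discard R (s - 1)) hndL hnd' hsub
      have hdl := discard_length s ls hlsnd hsls
      omega
    · rw [if_neg h1, if_neg h1]
      by_cases h2 : PySem.Set.contains R (s + 1) = true
      · rw [if_pos h2, if_pos h2]
        have := ih (PySem.Set.discard ls s) (PySem.Set.discard R (s + 1)) hndL hnd' hsub
        have hdl := discard_length s ls hlsnd hsls
        omega
      · rw [if_neg h2, if_neg h2]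
        exact ih ls R hndL hlsnd (fun x hx => hmem x (by simp [hx]))

theorem tp_drop (L : List Int) : ∀ (P Q : List Int), (∀ p ∈ P, ∀ s' ∈ L, p < s' - 1) →
    twoPointer L (P ++ Q) = twoPointer L Q := by
  cases L with
  | nil => intro P Q _; rfl
  | cons s' L =>
    intro P Q hP
    have hdrop : List.dropWhile (fun r => decide (r < s' - 1)) (P ++ Q)
        = List.dropWhile (fun r => decide (r < s' - 1)) Q := by
      rw [List.dropWhile_append]
      have : List.dropWhile (fun r => decide (r < s' - 1)) P = [] :=
        List.dropWhile_eq_nil_iff.mpr (fun x hx => by simp; exact hP x hx s' (by simp))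
      simp [this]
    simp only [twoPointer, hdrop]

theorem dropWhile_ge (c : Int) : ∀ (T : List Int), T.Pairwise (· < ·) →
    ∀ x ∈ T.dropWhile (fun r => decide (r < c)), c ≤ x := by
  intro T
  induction T with
  | nil => intro _; simp
  | cons a t ih =>
    intro hT
    rw [List.pairwise_cons] at hT
    obtain ⟨hat, ht⟩ := hT
    by_cases ha : a < c
    · rw [List.dropWhile_cons_of_pos (by simpa using ha)]
      exact ih ht
    · rw [List.dropWhile_cons_of_neg (by simpa using ha)]
      intro x hx
      rcases List.mem_cons.mp hx with rfl | hx
      · omega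
      · have := hat x hx; omega

theorem core (L : List Int) : ∀ (T : List Int), L.Pairwise (· < ·) → T.Pairwise (· < ·) →
    (∀ s ∈ L, s ∉ T) → (L.length : Int) - (mA L T : Int) = twoPointer L T := by
  induction L with
  | nil => intro T _ _ _; simp [mA, twoPointer]
  | cons s L ih =>
    intro T hL hT hdis
    rw [List.pairwise_cons] at hL
    obtain ⟨hsL, hLp⟩ := hL
    have hsT : s ∉ T := hdis s (by simp)
    have hdisL : ∀ x ∈ L, x ∉ T := fun x hx => hdis x (by simp [hx])
    have hPsmall : ∀ p ∈ T.takeWhile (fun r => decide (r < s - 1)), p < s - 1 := by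
      intro p hp
      simpa using List.mem_takeWhile_imp hp
    have hPL : ∀ p ∈ T.takeWhile (fun r => decide (r < s - 1)), ∀ s' ∈ L, p < s' - 1 := by
      intro p hp s' hs'
      have h1 := hPsmall p hp
      have h2 := hsL s' hs'
      omega
    have hUsub : (T.dropWhile (fun r => decide (r < s - 1))).Sublist T :=
      List.dropWhile_sublist _
    have hUpair : (T.dropWhile (fun r => decide (r < s - 1))).Pairwise (· < ·) :=
      List.Pairwise.sublist hUsub hT
    have hUge : ∀ x ∈ T.dropWhile (fun r => decide (r < s - 1)), s - 1 ≤ x :=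
      dropWhile_ge (s - 1) T hT
    have hPUT := List.takeWhile_append_dropWhile (p := fun r => decide (r < s - 1)) (l := T)
    have hmemU : ∀ x ∈ T, s - 1 ≤ x → x ∈ T.dropWhile (fun r => decide (r < s - 1)) := by
      intro x hx hge
      rw [← hPUT] at hx
      rcases List.mem_append.mp hx with h | h
      · have := hPsmall x h; omega
      · exact h
    by_cases hm1 : (s - 1) ∈ T
    · -- A uses the left neighbour; B's pointer stops exactly at it
      obtain ⟨rs, hU⟩ : ∃ rs, T.dropWhile (fun r => decide (r < s - 1)) = (s - 1) :: rs := by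
        have hmem1U := hmemU (s - 1) hm1 (le_refl _)
        cases hUc : T.dropWhile (fun r => decide (r < s - 1)) with
        | nil => rw [hUc] at hmem1U; cases hmem1U
        | cons r rs =>
          rw [hUc] at hmem1U
          have hp' := hUc ▸ hUpair
          rw [List.pairwise_cons] at hp'
          rcases List.mem_cons.mp hmem1U with h | h
          · exact ⟨rs, by rw [← h]⟩
          · have h1 := hp'.1 (s - 1) h
            have h2 := hUge r (by rw [hUc]; simp)
            omega
      have hrs_gt : ∀ x ∈ rs, s - 1 < x := by
        have hp' := hU ▸ hUpair
        rw [List.pairwise_cons] at hp'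
        exact hp'.1
      have hdisc : PySem.Set.discard T (s - 1)
          = T.takeWhile (fun r => decide (r < s - 1)) ++ rs := by
        simp only [PySem.Set.discard]
        conv_lhs => rw [← hPUT]
        rw [List.filter_append, hU, List.filter_cons]
        rw [List.filter_eq_self.mpr (fun p hp => by have := hPsmall p hp; simp; omega)]
        rw [if_neg (by simp)]
        rw [List.filter_eq_self.mpr (fun x hx => by have := hrs_gt x hx; simp; omega)]
      have hmA : mA (s :: L) T = mA L (PySem.Set.discard T (s - 1)) + 1 := by
        simp only [mA]
        rw [if_pos ((PySem.Set.contains_iff T (s - 1)).mpr hm1)]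
      have htp : twoPointer (s :: L) T = twoPointer L rs := by
        simp only [twoPointer, hU]
        rw [if_pos (by omega)]
      have hpair' : (T.takeWhile (fun r => decide (r < s - 1)) ++ rs).Pairwise (· < ·) := by
        rw [← hdisc]
        exact List.Pairwise.sublist (by simp only [PySem.Set.discard]; exact List.filter_sublist) hT
      have hdis' : ∀ x ∈ L, x ∉ T.takeWhile (fun r => decide (r < s - 1)) ++ rs := by
        intro x hx hmem
        rw [← hdisc] at hmem
        exact hdisL x hx ((PySem.Set.mem_discard T (s - 1) x).mp hmem).1
      have hihres := ih (T.takeWhile (fun r => decide (r < s - 1)) ++ rs) hLp hpair' hdis'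
      have hdropped := tp_drop L (T.takeWhile (fun r => decide (r < s - 1))) rs hPL
      rw [hdropped] at hihres
      rw [htp, hmA, hdisc]
      simp only [List.length_cons]
      push_cast
      omega
    · by_cases hm2 : (s + 1) ∈ T
      · -- A uses the right neighbour
        obtain ⟨rs, hU⟩ : ∃ rs, T.dropWhile (fun r => decide (r < s - 1)) = (s + 1) :: rs := by
          have hmem2U := hmemU (s + 1) hm2 (by omega)
          cases hUc : T.dropWhile (fun r => decide (r < s - 1)) with
          | nil => rw [hUc] at hmem2U; cases hmem2U
          | cons r rs =>
            rw [hUc] at hmem2U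
            have hp' := hUc ▸ hUpair
            rw [List.pairwise_cons] at hp'
            rcases List.mem_cons.mp hmem2U with h | h
            · exact ⟨rs, by rw [← h]⟩
            · have h1 := hp'.1 (s + 1) h
              have h2 := hUge r (by rw [hUc]; simp)
              have h3 : r ∈ T := hUsub.subset (by rw [hUc]; simp)
              have h4 : r ≠ s - 1 := fun he => hm1 (he ▸ h3)
              have h5 : r ≠ s := fun he => hsT (he ▸ h3)
              omega
        have hrs_gt : ∀ x ∈ rs, s + 1 < x := by
          have hp' := hU ▸ hUpair
          rw [List.pairwise_cons] at hp'
          exact hp'.1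
        have hdisc : PySem.Set.discard T (s + 1)
            = T.takeWhile (fun r => decide (r < s - 1)) ++ rs := by
          simp only [PySem.Set.discard]
          conv_lhs => rw [← hPUT]
          rw [List.filter_append, hU, List.filter_cons]
          rw [List.filter_eq_self.mpr (fun p hp => by have := hPsmall p hp; simp; omega)]
          rw [if_neg (by simp)]
          rw [List.filter_eq_self.mpr (fun x hx => by have := hrs_gt x hx; simp; omega)]
        have hmA : mA (s :: L) T = mA L (PySem.Set.discard T (s + 1)) + 1 := by
          simp only [mA]
          rw [if_neg (fun h => hm1 ((PySem.Set.contains_iff T (s - 1)).mp h))]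
          rw [if_pos ((PySem.Set.contains_iff T (s + 1)).mpr hm2)]
        have htp : twoPointer (s :: L) T = twoPointer L rs := by
          simp only [twoPointer, hU]
          rw [if_pos (by omega)]
        have hpair' : (T.takeWhile (fun r => decide (r < s - 1)) ++ rs).Pairwise (· < ·) := by
          rw [← hdisc]
          exact List.Pairwise.sublist (by simp only [PySem.Set.discard]; exact List.filter_sublist) hT
        have hdis' : ∀ x ∈ L, x ∉ T.takeWhile (fun r => decide (r < s - 1)) ++ rs := by
          intro x hx hmem
          rw [← hdisc] at hmem
          exact hdisL x hx ((PySem.Set.mem_discard T (s + 1) x).mp hmem).1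
        have hihres := ih (T.takeWhile (fun r => decide (r < s - 1)) ++ rs) hLp hpair' hdis'
        have hdropped := tp_drop L (T.takeWhile (fun r => decide (r < s - 1))) rs hPL
        rw [hdropped] at hihres
        rw [htp, hmA, hdisc]
        simp only [List.length_cons]
        push_cast
        omega
      · -- no neighbour available: both count this student as unmatched
        have hmA : mA (s :: L) T = mA L T := by
          simp only [mA]
          rw [if_neg (fun h => hm1 ((PySem.Set.contains_iff T (s - 1)).mp h))]
          rw [if_neg (fun h => hm2 ((PySem.Set.contains_iff T (s + 1)).mp h))]
        have hihres := ih T hLp hT hdisL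
        cases hUc : T.dropWhile (fun r => decide (r < s - 1)) with
        | nil =>
          have htp : twoPointer (s :: L) T = twoPointer L [] + 1 := by
            simp only [twoPointer, hUc]
          have hTP : T.takeWhile (fun r => decide (r < s - 1)) ++ ([] : List Int) = T := by
            rw [← hUc]; exact hPUT
          have hdropped := tp_drop L (T.takeWhile (fun r => decide (r < s - 1))) [] hPL
          rw [hTP] at hdropped
          rw [hdropped] at hihres
          rw [htp, hmA]
          simp only [List.length_cons]
          push_cast
          omega
        | cons r rs =>
          have h2 := hUge r (by rw [hUc]; simp)
          have h3 : r ∈ T := hUsub.subset (by rw [hUc]; simp)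
          have h4 : r ≠ s - 1 := fun he => hm1 (he ▸ h3)
          have h5 : r ≠ s := fun he => hsT (he ▸ h3)
          have h6 : r ≠ s + 1 := fun he => hm2 (he ▸ h3)
          have htp : twoPointer (s :: L) T = twoPointer L (r :: rs) + 1 := by
            simp only [twoPointer, hUc]
            rw [if_neg (by omega)]
          have hTP : T.takeWhile (fun r => decide (r < s - 1)) ++ (r :: rs) = T := by
            rw [← hUc]; exact hPUT
          have hdropped := tp_drop L (T.takeWhile (fun r => decide (r < s - 1))) (r :: rs) hPL
          rw [hTP] at hdropped
          rw [hdropped] at hihres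
          rw [htp, hmA]
          simp only [List.length_cons]
          push_cast
          omega

-- ===== VERDICT (by name: the statement is the Claim_ definition above) =====
theorem solution_spec : Claim_equal_solution := by
  intro n lost reserve _
  unfold Spec_solution
  have hL1 : PySem.Set.diff (PySem.Set.ofList lost)
        (PySem.Set.inter (PySem.Set.ofList lost) (PySem.Set.ofList reserve))
      = PySem.Set.diff (PySem.Set.ofList lost) (PySem.Set.ofList reserve) := by
    simp only [PySem.Set.diff]
    apply List.filter_congr
    intro x hx
    congr 1
    rw [← Bool.coe_iff_coe, PySem.Set.contains_iff, PySem.Set.contains_iff,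
      PySem.Set.mem_inter]
    exact ⟨fun h => h.2, fun h => ⟨hx, h⟩⟩
  have hR1 : PySem.Set.diff (PySem.Set.ofList reserve)
        (PySem.Set.inter (PySem.Set.ofList lost) (PySem.Set.ofList reserve))
      = PySem.Set.diff (PySem.Set.ofList reserve) (PySem.Set.ofList lost) := by
    simp only [PySem.Set.diff]
    apply List.filter_congr
    intro x hx
    congr 1
    rw [← Bool.coe_iff_coe, PySem.Set.contains_iff, PySem.Set.contains_iff,
      PySem.Set.mem_inter]
    exact ⟨fun h => h.1, fun h => ⟨h, hx⟩⟩
  dsimp only [solution, solution_alt]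
  rw [hL1, hR1]
  set LS := PySem.Set.diff (PySem.Set.ofList lost) (PySem.Set.ofList reserve) with hLSdef
  set RS := PySem.Set.diff (PySem.Set.ofList reserve) (PySem.Set.ofList lost) with hRSdef
  set L := PySem.List.sorted LS (fun x => x) false with hLdef
  set TT := PySem.List.sorted RS (fun x => x) false with hTTdef
  have hLSnd : LS.Nodup := PySem.Set.nodup_diff _ _ (PySem.Set.nodup_ofList lost)
  have hRSnd : RS.Nodup := PySem.Set.nodup_diff _ _ (PySem.Set.nodup_ofList reserve)
  have hLperm : L.Perm LS := PySem.List.sorted_perm LS (fun x => x) false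
  have hTTperm : TT.Perm RS := PySem.List.sorted_perm RS (fun x => x) false
  have hLnd : L.Nodup := hLperm.symm.nodup hLSnd
  have hTTnd : TT.Nodup := hTTperm.symm.nodup hRSnd
  have hLlt : L.Pairwise (· < ·) :=
    ((PySem.List.sorted_pairwise LS (fun x => x)).and hLnd).imp
      (fun h => lt_of_le_of_ne h.1 h.2)
  have hTTlt : TT.Pairwise (· < ·) :=
    ((PySem.List.sorted_pairwise RS (fun x => x)).and hTTnd).imp
      (fun h => lt_of_le_of_ne h.1 h.2)
  have hdisj : ∀ x ∈ L, x ∉ TT := by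
    intro x hx hxT
    have h1 := (PySem.Set.mem_diff _ _ x).mp (hLperm.subset hx)
    have h2 := (PySem.Set.mem_diff _ _ x).mp (hTTperm.subset hxT)
    exact h1.2 h2.1
  have hfold := fold_len L LS RS hLnd hLSnd (fun x hx => hLperm.subset hx)
  have hmAeq := mA_perm L hTTperm.symm
  have hcore := core L TT hLlt hTTlt hdisj
  have hlen : L.length = LS.length := hLperm.length_eq
  simp only [PySem.Set.len]
  omega
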